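-- pv_equiv track=rewrite | github.com/duriantaco/jonq | jonq/generator.py | make_selector_from_path
-- ===== SOURCE A (Python) =====
-- def make_selector_from_path(path_with_arrays: str) -> str:
--     pieces = []
--     remaining = path_with_arrays.lstrip(".")
--     while "[]" in remaining:
--         pre, remaining = remaining.split("[]", 1)
--         pre = pre.lstrip(".")
--         pieces.append(f".{pre}[]")
--         if remaining.startswith("."):
--             remaining = remaining[1:]
--     return " | ".join(pieces)
-- ===== SOURCE B (Python) =====
-- def make_selector_from_path(path_with_arrays: str) -> str:
--     segments = path_with_arrays.lstrip(".").split("[]")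
--     return " | ".join(f".{seg.lstrip('.')}[]" for seg in segments[:-1])
-- ===== Notes on version B (the rewrite author's own statement) =====
-- stated objective: simpler
-- what changed: A's while loop that repeatedly re-splits the shrinking remainder with a maxsplit-1 split is replaced by a single full split on the bracket separator plus a join over all segments but the last.
import Mathlib
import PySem

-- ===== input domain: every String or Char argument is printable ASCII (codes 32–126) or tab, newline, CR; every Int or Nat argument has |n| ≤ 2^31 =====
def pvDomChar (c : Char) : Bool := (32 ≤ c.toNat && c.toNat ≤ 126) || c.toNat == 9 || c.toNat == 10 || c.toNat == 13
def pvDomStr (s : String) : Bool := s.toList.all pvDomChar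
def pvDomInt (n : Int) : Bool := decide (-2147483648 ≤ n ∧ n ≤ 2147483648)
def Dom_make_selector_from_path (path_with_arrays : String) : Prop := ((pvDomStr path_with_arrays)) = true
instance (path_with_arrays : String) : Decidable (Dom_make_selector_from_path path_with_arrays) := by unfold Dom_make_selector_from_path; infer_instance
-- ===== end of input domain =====

-- B replaces A's repeated consuming split("[]", 1) loop with ONE split("[]") plus a map over
-- the segments (objective: simpler / single pass). Return values agree on every input; no mutation.

-- ===== PORT A =====

-- Port of the fused loop guard '"[]" in remaining' + 'pre, remaining = remaining.split("[]", 1)':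
-- scans for the FIRST occurrence of "[]"; none = not present (loop exits), some (pre, rest) = the
-- two halves. Exact: Python's split(sep, 1) splits at the first occurrence.
def pvSplitOnce : List Char → Option (List Char × List Char)
  | [] => none
  | c :: rest =>
    if ['[', ']'].isPrefixOf (c :: rest) then some ([], rest.drop 1)
    else
      match pvSplitOnce rest with
      | some (p, r) => some (c :: p, r)
      | none => none

theorem pvSplitOnce_length : ∀ (l p r : List Char), pvSplitOnce l = some (p, r) → r.length < l.length := by
  intro l
  induction l with
  | nil => intro p r h; simp [pvSplitOnce] at h
  | cons c rest ih =>
    intro p r h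
    by_cases hp : ['[', ']'].isPrefixOf (c :: rest) = true
    · simp [pvSplitOnce, hp] at h
      obtain ⟨_, hr⟩ := h
      subst hr
      simp only [List.length_tail, List.length_cons]
      omega
    · simp [pvSplitOnce, hp] at h
      cases hsr : pvSplitOnce rest with
      | none => simp [hsr] at h
      | some pr =>
        obtain ⟨p', r'⟩ := pr
        simp [hsr] at h
        obtain ⟨_, hr⟩ := h
        subst hr
        have := ih p' r' hsr
        simp only [List.length_cons]
        omega

-- The while loop of A: the accumulated pieces; lstrip(".") on pre is dropWhile (· == '.') (exact:
-- lstrip with a single-character set removes exactly the leading '.' characters).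
def pvLoopA (remaining : List Char) (pieces : List (List Char)) : List (List Char) :=
  match h : pvSplitOnce remaining with
  | none => pieces
  | some (pre, rest) =>
    let pre' := pre.dropWhile (· == '.')
    let rest' := if PySem.Chars.startswith rest ['.'] then rest.drop 1 else rest
    pvLoopA rest' (pieces ++ [['.'] ++ pre' ++ ['[', ']']])
termination_by remaining.length
decreasing_by
  have hlt := pvSplitOnce_length remaining pre rest h
  split <;> simp <;> omega

def make_selector_from_path (path_with_arrays : String) : String :=
  String.mk (PySem.Chars.join (" | ".toList)
    (pvLoopA (path_with_arrays.toList.dropWhile (· == '.')) []))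

-- ===== PORT B =====

-- f".{seg.lstrip('.')}[]" for one segment (lstrip('.') = dropWhile (· == '.'), exact as above)
def pvSeg (seg : List Char) : List Char := ['.'] ++ seg.dropWhile (· == '.') ++ ['[', ']']

def make_selector_from_path_alt (path_with_arrays : String) : String :=
  String.mk (PySem.Chars.join (" | ".toList)
    (((PySem.Chars.splitOn (path_with_arrays.toList.dropWhile (· == '.')) ['[', ']']).dropLast).map pvSeg))

-- ===== PRECONDITION & SPEC =====
def Spec_make_selector_from_path (path_with_arrays : String) (out : String) : Prop := out = make_selector_from_path_alt path_with_arrays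
instance (path_with_arrays : String) (out : String) : Decidable (Spec_make_selector_from_path path_with_arrays out) := by unfold Spec_make_selector_from_path; infer_instance

-- ===== CLAIM (what is proved, stated in full; the proofs are below) =====
def Claim_equal_make_selector_from_path : Prop := ∀ (path_with_arrays : String), Dom_make_selector_from_path path_with_arrays → Spec_make_selector_from_path path_with_arrays (make_selector_from_path path_with_arrays)

-- ===== LEMMAS AND PROOFS =====

-- A fuel-free model of PySem.Chars.splitOn at sep = "[]", with the current-piece accumulator.
def pvModel : List Char → List Char → List (List Char)
  | [], cur => [cur.reverse]
  | c :: rest, cur =>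
    if ['[', ']'].isPrefixOf (c :: rest) then cur.reverse :: pvModel (rest.drop 1) []
    else pvModel rest (c :: cur)
termination_by l _ => l.length
decreasing_by all_goals (simp only [List.drop_one, List.length_tail, List.length_cons]; omega)

theorem pv_go_eq_model : ∀ (fuel : Nat) (l cur : List Char) (acc : List (List Char)),
    l.length < fuel →
    PySem.Chars.splitOn.go ['[', ']'] fuel l cur acc = acc.reverse ++ pvModel l cur := by
  intro fuel
  induction fuel with
  | zero => intro l cur acc h; omega
  | succ n ih =>
    intro l cur acc h
    cases l with
    | nil => simp [PySem.Chars.splitOn.go, pvModel]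
    | cons c rest =>
      by_cases hp : ['[', ']'].isPrefixOf (c :: rest) = true
      · rw [show PySem.Chars.splitOn.go ['[', ']'] (n+1) (c :: rest) cur acc
            = PySem.Chars.splitOn.go ['[', ']'] n (List.drop 2 (c :: rest)) [] (cur.reverse :: acc) by
          simp [PySem.Chars.splitOn.go, hp]]
        rw [ih _ _ _ (by simp at h ⊢; omega)]
        simp [pvModel, hp]
      · rw [show PySem.Chars.splitOn.go ['[', ']'] (n+1) (c :: rest) cur acc
            = PySem.Chars.splitOn.go ['[', ']'] n rest (c :: cur) acc by
          simp [PySem.Chars.splitOn.go, hp]]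
        rw [ih _ _ _ (by simp at h ⊢; omega)]
        simp [pvModel, hp]

theorem pv_splitOn_eq_model (l : List Char) :
    PySem.Chars.splitOn l ['[', ']'] = pvModel l [] := by
  have := pv_go_eq_model (l.length + 1) l [] [] (by omega)
  simpa [PySem.Chars.splitOn] using this

theorem pvModel_cur : ∀ (n : Nat) (l cur : List Char), l.length ≤ n →
    ∃ h t, pvModel l [] = h :: t ∧ pvModel l cur = (cur.reverse ++ h) :: t := by
  intro n
  induction n with
  | zero =>
    intro l cur h
    have : l = [] := by cases l <;> simp_all
    subst this
    exact ⟨[], [], by simp [pvModel], by simp [pvModel]⟩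
  | succ m ih =>
    intro l cur h
    cases l with
    | nil => exact ⟨[], [], by simp [pvModel], by simp [pvModel]⟩
    | cons c rest =>
      by_cases hp : ['[', ']'].isPrefixOf (c :: rest) = true
      · exact ⟨[], pvModel (rest.drop 1) [], by simp [pvModel, hp], by simp [pvModel, hp]⟩
      · obtain ⟨hd, tl, h1, h2⟩ := ih rest [c] (by simp at h; omega)
        obtain ⟨hd', tl', h1', h2'⟩ := ih rest (c :: cur) (by simp at h; omega)
        rw [h1] at h1'
        injection h1' with e1 e2
        refine ⟨c :: hd, tl, ?_, ?_⟩
        · rw [show pvModel (c :: rest) [] = pvModel rest [c] by simp [pvModel, hp], h2]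
          simp
        · rw [show pvModel (c :: rest) cur = pvModel rest (c :: cur) by simp [pvModel, hp], h2',
            ← e1, ← e2]
          simp

theorem pvModel_ne_nil (l : List Char) : pvModel l [] ≠ [] := by
  obtain ⟨h, t, h1, _⟩ := pvModel_cur l.length l [] le_rfl
  simp [h1]

theorem pvSplitOnce_none_model {l : List Char} (h : pvSplitOnce l = none) : pvModel l [] = [l] := by
  induction l with
  | nil => simp [pvModel]
  | cons c rest ih =>
    by_cases hp : ['[', ']'].isPrefixOf (c :: rest) = true
    · simp [pvSplitOnce, hp] at h
    · simp [pvSplitOnce, hp] at h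
      cases hsr : pvSplitOnce rest with
      | none =>
        have hm := ih hsr
        obtain ⟨hd, tl, h1, h2⟩ := pvModel_cur rest.length rest [c] le_rfl
        rw [hm] at h1
        simp at h1
        rw [show pvModel (c :: rest) [] = pvModel rest [c] by simp [pvModel, hp], h2, h1.1, h1.2]
        simp
      | some pr => rw [hsr] at h; simp at h

theorem pvSplitOnce_some_model {l p r : List Char} (h : pvSplitOnce l = some (p, r)) :
    pvModel l [] = p :: pvModel r [] := by
  induction l generalizing p r with
  | nil => simp [pvSplitOnce] at h
  | cons c rest ih =>
    by_cases hp : ['[', ']'].isPrefixOf (c :: rest) = true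
    · simp [pvSplitOnce, hp] at h
      obtain ⟨h1, h2⟩ := h
      subst h1; subst h2
      simp [pvModel, hp]
    · simp [pvSplitOnce, hp] at h
      cases hsr : pvSplitOnce rest with
      | none => rw [hsr] at h; simp at h
      | some pr =>
        obtain ⟨p', r'⟩ := pr
        rw [hsr] at h
        simp at h
        obtain ⟨h1, h2⟩ := h
        subst h1; subst h2
        have hm := ih hsr
        obtain ⟨hd, tl, hm1, hm2⟩ := pvModel_cur rest.length rest [c] le_rfl
        rw [hm] at hm1
        simp at hm1
        rw [show pvModel (c :: rest) [] = pvModel rest [c] by simp [pvModel, hp], hm2, hm1.1, hm1.2]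
        simp

-- dropping one leading '.' of a piece does not change which selectors are produced
theorem pv_dot_drop (r : List Char) :
    (pvModel ('.' :: r) []).dropLast.map pvSeg = (pvModel r []).dropLast.map pvSeg := by
  have hp : ['[', ']'].isPrefixOf ('.' :: r) = false := by
    cases r <;> simp [List.isPrefixOf]
  obtain ⟨hd, tl, h1, h2⟩ := pvModel_cur r.length r ['.'] le_rfl
  rw [show pvModel ('.' :: r) [] = pvModel r ['.'] by simp [pvModel, hp], h2, h1]
  cases tl with
  | nil => simp
  | cons x xs => simp [pvSeg]

theorem pvLoopA_none {l : List Char} {acc : List (List Char)} (h : pvSplitOnce l = none) :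
    pvLoopA l acc = acc := by
  rw [pvLoopA]
  split
  · rfl
  · rename_i heq; rw [h] at heq; cases heq

theorem pvLoopA_some {l pre rest : List Char} {acc : List (List Char)}
    (h : pvSplitOnce l = some (pre, rest)) :
    pvLoopA l acc
      = pvLoopA (if PySem.Chars.startswith rest ['.'] then rest.drop 1 else rest)
          (acc ++ [['.'] ++ pre.dropWhile (· == '.') ++ ['[', ']']]) := by
  rw [pvLoopA]
  split
  · rename_i heq; rw [h] at heq; cases heq
  · rename_i pre' rest' heq
    rw [h] at heq
    injection heq with heq'
    injection heq' with e1 e2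
    subst e1; subst e2
    rfl

theorem pvLoopA_eq : ∀ (n : Nat) (l : List Char), l.length ≤ n → ∀ (acc : List (List Char)),
    pvLoopA l acc = acc ++ (pvModel l []).dropLast.map pvSeg := by
  intro n
  induction n with
  | zero =>
    intro l h acc
    have : l = [] := by cases l <;> simp_all
    subst this
    rw [pvLoopA_none (by simp [pvSplitOnce])]
    simp [pvModel]
  | succ m ih =>
    intro l h acc
    cases hso : pvSplitOnce l with
    | none =>
      rw [pvLoopA_none hso, pvSplitOnce_none_model hso]
      simp
    | some pr =>
      obtain ⟨pre, rest⟩ := pr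
      have hlen := pvSplitOnce_length l pre rest hso
      rw [pvLoopA_some hso]
      have hrest' : (if PySem.Chars.startswith rest ['.'] then rest.drop 1 else rest).length ≤ m := by
        split
        · simp only [List.drop_one, List.length_tail]; omega
        · omega
      rw [ih _ hrest']
      have hmap : (pvModel (if PySem.Chars.startswith rest ['.'] then rest.drop 1 else rest) []).dropLast.map pvSeg
          = (pvModel rest []).dropLast.map pvSeg := by
        cases rest with
        | nil => simp [PySem.Chars.startswith, List.isPrefixOf]
        | cons c rs =>
          by_cases hc : c = '.'
          · subst hc
            rw [if_pos (by simp [PySem.Chars.startswith, List.isPrefixOf])]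
            simpa using (pv_dot_drop rs).symm
          · rw [if_neg (by simp [PySem.Chars.startswith, List.isPrefixOf]; exact Ne.symm hc)]
      rw [hmap, pvSplitOnce_some_model hso,
        List.dropLast_cons_of_ne_nil (pvModel_ne_nil rest)]
      simp [pvSeg]

-- ===== VERDICT (by name: the statement is the Claim_ definition above) =====
theorem make_selector_from_path_spec : Claim_equal_make_selector_from_path := by
  intro s _
  unfold Spec_make_selector_from_path make_selector_from_path make_selector_from_path_alt
  rw [pv_splitOn_eq_model, pvLoopA_eq (s.toList.dropWhile (· == '.')).length _ le_rfl]
  simp
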